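-- pv_equiv track=rewrite | github.com/gda-score/code | gdascore/gdaScore.py | _checkSinglingOut
-- ===== SOURCE A (Python) =====
-- def _checkSinglingOut(ans):
--     # column 0 must be UID
--     # User is singled-out if there is only one distinct UID
--     # Returns 1 if singling out claim correct, else returns 0
--     if len(ans) == 0:
--         return 0
--     uids = {}
--     for row in ans:
--         uids[row[0]] = 1
--     numUids = len(uids)
--     if numUids == 1:
--         return 1
--     else:
--         return 0
-- ===== SOURCE B (Python) =====
-- def _checkSinglingOut(ans):
--     # B: compare every row's UID against the first row's UID; no container maintained.
--     if not ans:
--         return 0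
--     ref = ans[0][0]
--     return 1 if all(row[0] == ref for row in ans) else 0
-- ===== Notes on version B (the rewrite author's own statement) =====
-- stated objective: simpler
-- what changed: B drops the dict of distinct UIDs and its final size test: it takes the first row's UID as a reference and returns 1 iff every row's column 0 equals it, via all().
import Mathlib
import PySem

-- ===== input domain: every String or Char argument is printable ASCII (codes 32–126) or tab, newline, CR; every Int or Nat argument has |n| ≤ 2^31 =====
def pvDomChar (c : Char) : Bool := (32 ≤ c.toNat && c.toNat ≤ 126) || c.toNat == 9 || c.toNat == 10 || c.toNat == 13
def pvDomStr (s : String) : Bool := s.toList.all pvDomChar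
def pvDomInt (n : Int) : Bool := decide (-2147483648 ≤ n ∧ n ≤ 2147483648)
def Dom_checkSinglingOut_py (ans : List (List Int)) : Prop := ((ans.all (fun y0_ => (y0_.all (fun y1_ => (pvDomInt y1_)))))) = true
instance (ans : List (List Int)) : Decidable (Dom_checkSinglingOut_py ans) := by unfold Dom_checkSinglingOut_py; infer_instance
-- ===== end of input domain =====

-- B drops A's dict of distinct UIDs: it compares every row's UID against the first row's UID ("simpler").

-- ===== PORT A =====
-- A: if empty return 0; build a dict keyed by row[0]; return 1 iff it has exactly one key.
def checkSinglingOut_py (ans : List (List Int)) : Int :=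
  if ans.length = 0 then 0
  else
    let uids : PySem.Dict Int Int :=
      ans.foldl (fun d row => d.insert (PySem.List.pyGetD row 0 0) 1) PySem.Dict.empty
    let numUids := uids.size
    if numUids = 1 then 1 else 0

-- ===== PORT B =====
-- B: reference = first row's UID; 1 iff all rows' column 0 equal it.
def checkSinglingOut_py_alt (ans : List (List Int)) : Int :=
  match ans with
  | [] => 0
  | first :: _ =>
    let ref := PySem.List.pyGetD first 0 0
    if ans.all (fun row => PySem.List.pyGetD row 0 0 == ref) then 1 else 0

-- ===== PRECONDITION & SPEC =====
-- Pre_ excludes inputs containing an empty row, on which Python's row[0] raises IndexError (in A and in B).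
def Pre_checkSinglingOut_py (ans : List (List Int)) : Prop := ∀ row ∈ ans, row ≠ []
instance (ans : List (List Int)) : Decidable (Pre_checkSinglingOut_py ans) := by unfold Pre_checkSinglingOut_py; infer_instance
def pvWitness_checkSinglingOut_py : List (List Int) := [[1], [1, 2]]

def Spec_checkSinglingOut_py (ans : List (List Int)) (out : Int) : Prop := out = checkSinglingOut_py_alt ans
instance (ans : List (List Int)) (out : Int) : Decidable (Spec_checkSinglingOut_py ans out) := by unfold Spec_checkSinglingOut_py; infer_instance

-- ===== CLAIM (what is proved, stated in full; the proofs are below) =====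
def Claim_equal_checkSinglingOut_py : Prop := ∀ (ans : List (List Int)), Dom_checkSinglingOut_py ans → Pre_checkSinglingOut_py ans → Spec_checkSinglingOut_py ans (checkSinglingOut_py ans)

-- ===== LEMMAS AND PROOFS =====

-- A singleton-plus-tail list dedups to one element iff every tail element equals the head.
theorem pv_ofList_len_one (a : Int) (xs : List Int) :
    (PySem.Set.ofList (a :: xs)).length = 1 ↔ xs.all (· == a) := by
  rw [PySem.Set.ofList_cons]
  simp only [List.length_cons]
  constructor
  · intro h
    have hd : (PySem.Set.ofList xs).discard a = [] := List.length_eq_zero_iff.mp (by omega)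
    rw [List.all_eq_true]
    intro x hx
    by_contra hne
    have hmem : x ∈ (PySem.Set.ofList xs).discard a := by
      rw [PySem.Set.mem_discard]
      exact ⟨(PySem.Set.mem_ofList _ _).2 hx, by simpa using hne⟩
    rw [hd] at hmem
    simp at hmem
  · intro h
    have hd : (PySem.Set.ofList xs).discard a = [] := by
      rw [List.eq_nil_iff_forall_not_mem]
      intro x hx
      rw [PySem.Set.mem_discard, PySem.Set.mem_ofList] at hx
      exact hx.2 (by simpa using (List.all_eq_true.mp h) x hx.1)
    rw [hd]
    rfl

-- ===== VERDICT (by name: the statement is the Claim_ definition above) =====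
theorem checkSinglingOut_py_spec : Claim_equal_checkSinglingOut_py := by
  intro ans _ _
  unfold Spec_checkSinglingOut_py checkSinglingOut_py checkSinglingOut_py_alt
  cases ans with
  | nil => rfl
  | cons first rest =>
    have hlen : (first :: rest).length ≠ 0 := by simp
    rw [if_neg hlen]
    have hkeys :
        ((first :: rest).foldl (fun d row => d.insert (PySem.List.pyGetD row 0 0) (1 : Int))
          (PySem.Dict.empty : PySem.Dict Int Int)).keys
        = PySem.Set.ofList ((first :: rest).map (fun row => PySem.List.pyGetD row 0 0)) := by
      rw [PySem.Dict.keys_foldl_insert_key]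
      rw [PySem.Dict.keys_empty, PySem.Set.update_nil_left]
    have hsize :
        ((first :: rest).foldl (fun d row => d.insert (PySem.List.pyGetD row 0 0) (1 : Int))
          (PySem.Dict.empty : PySem.Dict Int Int)).size
        = (PySem.Set.ofList (PySem.List.pyGetD first 0 0 :: rest.map (fun row => PySem.List.pyGetD row 0 0))).length := by
      have h2 := congrArg List.length hkeys
      simpa only [PySem.Dict.size, PySem.Dict.keys, List.length_map, List.map_cons] using h2
    show (if (List.foldl (fun d row => d.insert (PySem.List.pyGetD row 0 0) (1 : Int))
            (PySem.Dict.empty : PySem.Dict Int Int) (first :: rest)).size = 1 then (1 : Int) else 0)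
        = (if ((first :: rest).all fun row =>
              PySem.List.pyGetD row 0 0 == PySem.List.pyGetD first 0 0) = true then (1 : Int) else 0)
    rw [hsize]
    simp only [pv_ofList_len_one, List.all_map, List.all_cons, beq_self_eq_true, Bool.true_and]
    rfl
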